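-- pv_equiv track=rewrite | github.com/daxelka/branching-process | mtbp_analysis_class.py | calc_zero_sequences
-- ===== SOURCE A (Python) =====
-- def calc_zero_sequences(arr):
--     first_non_zero = None
--     zero_sequences = []
--     gen_reinfections = []
--     current_sequence = 0
--     for pos, num in enumerate(arr):
--         if first_non_zero is None:
--             if num != 0:
--                 first_non_zero = num
--         else:
--             if num == 0:
--                 current_sequence += 1
--             else:
--                 if current_sequence != 0:
--                     zero_sequences.append(current_sequence)
--                     gen_reinfections.append(pos)
--                 current_sequence = 0
--     # if current_sequence != 0:
--     #     zero_sequences.append(current_sequence)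
--     return zero_sequences, gen_reinfections
-- ===== SOURCE B (Python) =====
-- def calc_zero_sequences(arr):
--     idx = [p for p, n in enumerate(arr) if n != 0]
--     zero_sequences = []
--     gen_reinfections = []
--     for prev, cur in zip(idx, idx[1:]):
--         gap = cur - prev - 1
--         if gap != 0:
--             zero_sequences.append(gap)
--             gen_reinfections.append(cur)
--     return zero_sequences, gen_reinfections
-- ===== Notes on version B (the rewrite author's own statement) =====
-- stated objective: alternative
-- what changed: Replaces A's stateful single scan (optional first-nonzero flag plus running zero counter) by building the list of nonzero indices once and deriving each zero-run length as the gap cur - prev - 1 between consecutive nonzero indices.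
import Mathlib
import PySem

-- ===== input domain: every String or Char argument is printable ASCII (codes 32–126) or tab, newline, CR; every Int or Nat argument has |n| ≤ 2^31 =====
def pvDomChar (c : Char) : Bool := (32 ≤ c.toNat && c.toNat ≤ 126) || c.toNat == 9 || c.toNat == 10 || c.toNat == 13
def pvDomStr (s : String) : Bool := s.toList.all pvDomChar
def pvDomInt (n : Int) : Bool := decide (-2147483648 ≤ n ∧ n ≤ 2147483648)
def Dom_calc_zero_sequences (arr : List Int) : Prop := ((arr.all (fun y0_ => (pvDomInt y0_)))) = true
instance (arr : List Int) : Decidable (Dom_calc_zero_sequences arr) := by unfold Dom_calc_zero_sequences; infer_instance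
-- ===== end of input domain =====

-- B replaces A's stateful scan (first-nonzero flag + running zero counter) by computing the
-- nonzero indices once and reading each zero-run off the gap between consecutive nonzero indices
-- (objective: alternative decomposition, same O(n) cost).


-- ===== PORT A =====
-- A's loop body, one step per (pos, num) of enumerate(arr); state = (first_non_zero, zero_sequences, gen_reinfections, current_sequence)
def stepA (st : Option Int × List Int × List Int × Int) (pn : Int × Int) :
    Option Int × List Int × List Int × Int :=
  match st, pn with
  | (fnz, zs, gs, cur), (pos, num) =>
    match fnz with
    | none => if num ≠ 0 then (some num, zs, gs, cur) else (none, zs, gs, cur)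
    | some v =>
      if num = 0 then (some v, zs, gs, cur + 1)
      else if cur ≠ 0 then (some v, zs ++ [cur], gs ++ [pos], 0)
      else (some v, zs, gs, 0)

def calc_zero_sequences (arr : List Int) : List Int × List Int :=
  let st := (PySem.List.enumerate arr).foldl stepA (none, [], [], 0)
  (st.2.1, st.2.2.1)

-- ===== PORT B =====
-- B's loop body, one step per consecutive pair (prev, cur) of the nonzero-index list
def stepB (st : List Int × List Int) (pc : Int × Int) : List Int × List Int :=
  let gap := pc.2 - pc.1 - 1
  if gap ≠ 0 then (st.1 ++ [gap], st.2 ++ [pc.2]) else st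

def calc_zero_sequences_alt (arr : List Int) : List Int × List Int :=
  let idx : List Int :=
    (PySem.List.enumerate arr).filterMap (fun pn => if pn.2 ≠ 0 then some pn.1 else none)
  (idx.zip (PySem.List.slice idx (some 1) none)).foldl stepB ([], [])

-- ===== PRECONDITION & SPEC =====
def Spec_calc_zero_sequences (arr : List Int) (out : List Int × List Int) : Prop := out = calc_zero_sequences_alt arr
instance (arr : List Int) (out : List Int × List Int) : Decidable (Spec_calc_zero_sequences arr out) := by unfold Spec_calc_zero_sequences; infer_instance

-- ===== CLAIM (what is proved, stated in full; the proofs are below) =====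
def Claim_equal_calc_zero_sequences : Prop := ∀ (arr : List Int), Dom_calc_zero_sequences arr → Spec_calc_zero_sequences arr (calc_zero_sequences arr)

-- ===== LEMMAS AND PROOFS =====

-- positions (starting at p) of the nonzero entries of the list
def nzIdx : List Int → Int → List Int
  | [], _ => []
  | a :: t, p => if a ≠ 0 then p :: nzIdx t (p + 1) else nzIdx t (p + 1)

-- the (gaps, positions) produced from consecutive pairs of an index list
def pairsZ : List Int → List Int × List Int
  | a :: b :: t =>
    let r := pairsZ (b :: t)
    if b - a - 1 ≠ 0 then ((b - a - 1) :: r.1, b :: r.2) else r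
  | _ => ([], [])

theorem filterMap_enumerate_eq_nzIdx (arr : List Int) (p : Int) :
    (PySem.List.enumerate arr p).filterMap (fun pn => if pn.2 = 0 then none else some pn.1)
      = nzIdx arr p := by
  induction arr generalizing p with
  | nil => simp [PySem.List.enumerate, nzIdx]
  | cons a t ih =>
    by_cases h : a = 0 <;> simp [PySem.List.enumerate, nzIdx, h, ih]

theorem foldl_stepB_zip_tail (l : List Int) :
    ∀ acc : List Int × List Int,
      (l.zip l.tail).foldl stepB acc
        = (acc.1 ++ (pairsZ l).1, acc.2 ++ (pairsZ l).2) := by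
  induction l with
  | nil => intro acc; simp [pairsZ]
  | cons a t ih =>
    intro acc
    cases t with
    | nil => simp [pairsZ]
    | cons b t' =>
      show List.foldl stepB (stepB acc (a, b)) ((b :: t').zip (b :: t').tail) = _
      rw [ih]
      by_cases h : b - a - 1 = 0 <;>
        simp [stepB, pairsZ, h, List.append_assoc]

theorem foldl_stepA_after (arr : List Int) :
    ∀ (p q : Int) (v : Int) (zs gs : List Int),
      ∃ c, (PySem.List.enumerate arr p).foldl stepA (some v, zs, gs, p - q - 1)
        = (some v, zs ++ (pairsZ (q :: nzIdx arr p)).1,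
                   gs ++ (pairsZ (q :: nzIdx arr p)).2, c) := by
  induction arr with
  | nil => intro p q v zs gs; exact ⟨p - q - 1, by simp [PySem.List.enumerate, nzIdx, pairsZ]⟩
  | cons a t ih =>
    intro p q v zs gs
    by_cases h : a = 0
    · -- zero entry: counter becomes (p+1) - q - 1, nonzero indices unchanged
      obtain ⟨c, hc⟩ := ih (p + 1) q v zs gs
      refine ⟨c, ?_⟩
      have : p - q - 1 + 1 = (p + 1) - q - 1 := by ring
      simp [PySem.List.enumerate, stepA, h, nzIdx, this, hc]
    · by_cases hg : p - q - 1 = 0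
      · -- nonzero entry right after the previous one: nothing recorded, new previous index is p
        obtain ⟨c, hc⟩ := ih (p + 1) p v zs gs
        rw [show p + 1 - p - 1 = (0 : Int) by ring] at hc
        refine ⟨c, ?_⟩
        simp only [PySem.List.enumerate, List.foldl_cons, stepA]
        rw [if_neg h, if_neg (by omega : ¬p - q - 1 ≠ 0)]
        simpa [nzIdx, pairsZ, h, hg] using hc
      · -- nonzero entry ending a zero run of length p - q - 1: record (gap, p)
        obtain ⟨c, hc⟩ := ih (p + 1) p v (zs ++ [p - q - 1]) (gs ++ [p])
        rw [show p + 1 - p - 1 = (0 : Int) by ring] at hc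
        refine ⟨c, ?_⟩
        simp only [PySem.List.enumerate, List.foldl_cons, stepA]
        rw [if_neg h, if_pos hg, hc]
        simp [nzIdx, pairsZ, h, hg, List.append_assoc]

theorem foldl_stepA_before (arr : List Int) :
    ∀ p : Int, ∃ f c,
      (PySem.List.enumerate arr p).foldl stepA (none, [], [], 0)
        = (f, (pairsZ (nzIdx arr p)).1, (pairsZ (nzIdx arr p)).2, c) := by
  induction arr with
  | nil => intro p; exact ⟨none, 0, by simp [PySem.List.enumerate, nzIdx, pairsZ]⟩
  | cons a t ih =>
    intro p
    by_cases h : a = 0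
    · obtain ⟨f, c, hc⟩ := ih (p + 1)
      exact ⟨f, c, by simp [PySem.List.enumerate, stepA, h, nzIdx, hc]⟩
    · obtain ⟨c, hc⟩ := foldl_stepA_after t (p + 1) p a [] []
      rw [show p + 1 - p - 1 = (0 : Int) by ring] at hc
      refine ⟨some a, c, ?_⟩
      simp only [PySem.List.enumerate, List.foldl_cons, stepA]
      rw [if_pos h, hc]
      simp [nzIdx, h]

-- ===== VERDICT (by name: the statement is the Claim_ definition above) =====
theorem calc_zero_sequences_spec : Claim_equal_calc_zero_sequences := by
  intro arr _
  show calc_zero_sequences arr = calc_zero_sequences_alt arr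
  unfold calc_zero_sequences calc_zero_sequences_alt
  simp only [ne_eq, ite_not]
  rw [filterMap_enumerate_eq_nzIdx arr 0, PySem.List.slice_from_one,
    foldl_stepB_zip_tail]
  obtain ⟨f, c, hc⟩ := foldl_stepA_before arr 0
  simp [hc]
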